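-- pv_equiv track=rewrite | github.com/edurodriguesn/my_streamlit_apps | pages/estrategia_anki.py | limpar_rodape_estrategia
-- ===== SOURCE A (Python) =====
-- def limpar_rodape_estrategia(texto_completo):
--     """
--     Remove linhas contendo 'www.estrategiaconcursos.com.br',
--     bem como 3 linhas acima e 3 linhas abaixo.
--     """
--     linhas = texto_completo.splitlines()
--     indices_para_remover = set()
--
--     for i, linha in enumerate(linhas):
--         if "www.estrategiaconcursos.com.br" in linha:
--             inicio = max(0, i - 3)
--             fim = min(len(linhas), i + 4)
--             for k in range(inicio, fim):
--                 indices_para_remover.add(k)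
--
--     linhas_limpas = [linha for i, linha in enumerate(linhas) if i not in indices_para_remover]
--     return "\n".join(linhas_limpas)
-- ===== SOURCE B (Python) =====
-- def limpar_rodape_estrategia(texto_completo):
--     """
--     Remove linhas contendo 'www.estrategiaconcursos.com.br',
--     bem como 3 linhas acima e 3 linhas abaixo.
--     """
--     linhas = texto_completo.splitlines()
--     matches = [i for i, linha in enumerate(linhas)
--                if "www.estrategiaconcursos.com.br" in linha]
--     linhas_limpas = [linha for i, linha in enumerate(linhas)
--                      if all(abs(i - m) > 3 for m in matches)]
--     return "\n".join(linhas_limpas)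
-- ===== Notes on version B (the rewrite author's own statement) =====
-- stated objective: alternative
-- what changed: A expands each match into an index window stored in a set and filters by set membership; B collects the match indices once and keeps each line by a direct proximity test abs(i-m) > 3 against that list.
import Mathlib
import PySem

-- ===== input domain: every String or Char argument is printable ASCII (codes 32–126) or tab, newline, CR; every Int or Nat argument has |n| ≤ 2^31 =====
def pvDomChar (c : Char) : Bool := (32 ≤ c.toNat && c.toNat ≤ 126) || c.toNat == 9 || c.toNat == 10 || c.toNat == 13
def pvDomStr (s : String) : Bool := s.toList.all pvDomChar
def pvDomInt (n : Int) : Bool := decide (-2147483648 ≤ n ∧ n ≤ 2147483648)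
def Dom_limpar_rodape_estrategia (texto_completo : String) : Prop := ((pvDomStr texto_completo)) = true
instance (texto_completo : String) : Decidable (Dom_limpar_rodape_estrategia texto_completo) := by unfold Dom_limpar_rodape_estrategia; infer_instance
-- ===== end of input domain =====

-- B replaces A's expand-windows-into-a-set-then-filter with collect-match-indices-then-proximity-test; alternative decomposition, same result.

-- ===== PORT A =====
def limpar_rodape_estrategia (texto_completo : String) : String :=
  let linhas := PySem.Str.splitlines texto_completo
  let indices_para_remover : PySem.Set Int :=
    (PySem.List.enumerate linhas).foldl
      (fun s p =>
        if PySem.Str.isIn "www.estrategiaconcursos.com.br" p.2 then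
          let inicio := max 0 (p.1 - 3)
          let fim := min (linhas.length : Int) (p.1 + 4)
          (PySem.List.pyRange inicio fim 1).foldl (fun s k => PySem.Set.add s k) s
        else s)
      PySem.Set.empty
  let linhas_limpas := ((PySem.List.enumerate linhas).filter
      (fun p => !(PySem.Set.contains indices_para_remover p.1))).map (·.2)
  PySem.Str.join "\n" linhas_limpas

-- ===== PORT B =====
def limpar_rodape_estrategia_alt (texto_completo : String) : String :=
  let linhas := PySem.Str.splitlines texto_completo
  let hits := ((PySem.List.enumerate linhas).filter
      (fun p => PySem.Str.isIn "www.estrategiaconcursos.com.br" p.2)).map (·.1)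
  let linhas_limpas := ((PySem.List.enumerate linhas).filter
      (fun p => hits.all (fun m => decide (3 < |p.1 - m|)))).map (·.2)
  PySem.Str.join "\n" linhas_limpas

-- ===== PRECONDITION & SPEC =====
def Spec_limpar_rodape_estrategia (texto_completo : String) (out : String) : Prop := out = limpar_rodape_estrategia_alt texto_completo
instance (texto_completo : String) (out : String) : Decidable (Spec_limpar_rodape_estrategia texto_completo out) := by unfold Spec_limpar_rodape_estrategia; infer_instance

-- ===== CLAIM (what is proved, stated in full; the proofs are below) =====
def Claim_equal_limpar_rodape_estrategia : Prop := ∀ (texto_completo : String), Dom_limpar_rodape_estrategia texto_completo → Spec_limpar_rodape_estrategia texto_completo (limpar_rodape_estrategia texto_completo)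

-- ===== LEMMAS AND PROOFS =====

-- membership in the set built by A's outer loop
theorem mem_remover_foldl (n : Int) (l : List (Int × String)) (s : PySem.Set Int) (k : Int) :
    k ∈ l.foldl
      (fun s p =>
        if PySem.Str.isIn "www.estrategiaconcursos.com.br" p.2 then
          (PySem.List.pyRange (max 0 (p.1 - 3)) (min n (p.1 + 4)) 1).foldl (fun s k => PySem.Set.add s k) s
        else s) s ↔
    k ∈ s ∨ ∃ p ∈ l, PySem.Str.isIn "www.estrategiaconcursos.com.br" p.2 = true ∧
      max 0 (p.1 - 3) ≤ k ∧ k < min n (p.1 + 4) := by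
  induction l generalizing s with
  | nil => simp
  | cons q l ih =>
    simp only [List.foldl_cons]
    by_cases hq : PySem.Str.isIn "www.estrategiaconcursos.com.br" q.2 = true
    · rw [if_pos hq, ih]
      have : k ∈ (PySem.List.pyRange (max 0 (q.1 - 3)) (min n (q.1 + 4)) 1).foldl
          (fun s k => PySem.Set.add s k) s ↔
          k ∈ s ∨ (max 0 (q.1 - 3) ≤ k ∧ k < min n (q.1 + 4)) := by
        have h := PySem.Set.mem_foldl_add (l := PySem.List.pyRange (max 0 (q.1 - 3)) (min n (q.1 + 4)) 1)
          (s := s) (f := fun (x : Int) => x) (y := k)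
        simp only [h]
        constructor
        · rintro (h | ⟨b, hb, rfl⟩)
          · exact Or.inl h
          · exact Or.inr ((PySem.List.mem_pyRange_one).mp hb)
        · rintro (h | h)
          · exact Or.inl h
          · exact Or.inr ⟨k, (PySem.List.mem_pyRange_one).mpr h, rfl⟩
      rw [this]
      constructor
      · rintro (⟨h | h⟩ | ⟨p, hp, h⟩)
        · exact Or.inl h
        · exact Or.inr ⟨q, List.mem_cons_self .., hq, h⟩
        · exact Or.inr ⟨p, List.mem_cons_of_mem _ hp, h⟩
      · rintro (h | ⟨p, hp, h⟩)
        · exact Or.inl (Or.inl h)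
        · rcases List.mem_cons.mp hp with rfl | hp
          · exact Or.inl (Or.inr ⟨h.2.1, h.2.2⟩)
          · exact Or.inr ⟨p, hp, h⟩
    · rw [if_neg hq, ih]
      constructor
      · rintro (h | ⟨p, hp, h⟩)
        · exact Or.inl h
        · exact Or.inr ⟨p, List.mem_cons_of_mem _ hp, h⟩
      · rintro (h | ⟨p, hp, h⟩)
        · exact Or.inl h
        · rcases List.mem_cons.mp hp with rfl | hp
          · exact absurd h.1 hq
          · exact Or.inr ⟨p, hp, h⟩

theorem fst_mem_enumerate {α : Type} {p : Int × α} {xs : List α} (h : p ∈ PySem.List.enumerate xs 0) :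
    0 ≤ p.1 ∧ p.1 < (xs.length : Int) := by
  rcases (PySem.List.mem_enumerate_iff xs 0 p).mp h with ⟨k, hk, rfl⟩
  constructor
  · simp
  · simp
    omega

-- ===== VERDICT (by name: the statement is the Claim_ definition above) =====
theorem limpar_rodape_estrategia_spec : Claim_equal_limpar_rodape_estrategia := by
  intro texto hdom
  unfold Spec_limpar_rodape_estrategia limpar_rodape_estrategia limpar_rodape_estrategia_alt
  set linhas := PySem.Str.splitlines texto with hl
  dsimp only
  refine congrArg (PySem.Str.join "\n") (congrArg (List.map _) (List.filter_congr ?_))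
  intro p hp
  have hpb := fst_mem_enumerate hp
  have hmem := mem_remover_foldl (n := (linhas.length : Int))
    (l := PySem.List.enumerate linhas) (s := PySem.Set.empty) (k := p.1)
  rw [Bool.eq_iff_iff, Bool.not_eq_true', ← Bool.not_eq_true, ← not_iff_not]
  simp only [PySem.Set.contains_iff]
  rw [hmem]
  simp only [not_not, PySem.Set.empty, List.not_mem_nil, false_or,
    List.all_eq_true, List.mem_map, List.mem_filter, not_forall]
  constructor
  · rintro ⟨q, hq, hqin, hw⟩
    refine ⟨q.1, ⟨q, ⟨hq, hqin⟩, rfl⟩, ?_⟩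
    have hqb := fst_mem_enumerate hq
    simp only [decide_eq_true_eq, not_lt]
    rw [abs_sub_le_iff]
    omega
  · rintro ⟨m, ⟨q, ⟨hq, hqin⟩, rfl⟩, hm⟩
    have hqb := fst_mem_enumerate hq
    refine ⟨q, hq, hqin, ?_⟩
    simp only [decide_eq_true_eq, not_lt, abs_sub_le_iff] at hm
    omega
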